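-- pv_equiv track=rewrite | github.com/luongphambao/UAIC2022 | predict_ocr.py | remove_sdt
-- ===== SOURCE A (Python) =====
-- def remove_sdt(text):
--     count=0
--     #remove . -
--     text=text.replace(".","")
--     text=text.replace("-","")
--     for i in range(len(text)):
--         if text[i] in ["0","1","2","3","4","5","6","7","8","9"]:
--             count+=1
--     if count>=2 and count<=8 and count==len(text) and text[0]=="0":
--         return True
--     return False
-- ===== SOURCE B (Python) =====
-- import re
--
-- _PHONE_RE = re.compile(r"0[0-9]{1,7}")
--
-- def remove_sdt(text):
--     text = text.replace(".", "")
--     text = text.replace("-", "")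
--     return _PHONE_RE.fullmatch(text) is not None
-- ===== Notes on version B (the rewrite author's own statement) =====
-- stated objective: idiomatic
-- what changed: Replaced the index loop counting digits and the compound length/first-character test with a single precompiled regex fullmatch of 0[0-9]{1,7} after the same two replace calls.
import Mathlib
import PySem

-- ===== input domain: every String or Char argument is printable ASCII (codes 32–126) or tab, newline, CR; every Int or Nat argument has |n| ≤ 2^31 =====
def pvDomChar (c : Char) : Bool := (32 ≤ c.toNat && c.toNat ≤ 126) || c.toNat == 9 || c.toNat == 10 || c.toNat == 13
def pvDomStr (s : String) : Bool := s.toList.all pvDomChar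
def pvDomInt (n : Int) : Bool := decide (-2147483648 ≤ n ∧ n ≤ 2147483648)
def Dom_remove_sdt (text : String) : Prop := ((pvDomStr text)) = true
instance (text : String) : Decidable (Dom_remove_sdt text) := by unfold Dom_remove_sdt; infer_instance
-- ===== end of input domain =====

-- B replaces A's digit-count loop and compound test with a regex fullmatch of 0[0-9]{1,7} (same replace calls); equivalence proved on Dom.
-- ===== PORT A =====
def remove_sdt (text : String) : Bool :=
  let t := (PySem.Str.replace (PySem.Str.replace text "." "") "-" "").toList
  let count : Nat := (PySem.List.pyRange 0 t.length 1).foldl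
    (fun c i =>
      if (PySem.List.pyGetD t i ' ') ∈ ['0','1','2','3','4','5','6','7','8','9'] then c + 1 else c) 0
  if 2 ≤ count ∧ count ≤ 8 ∧ count = t.length ∧ PySem.List.pyGet? t 0 = some '0' then true
  else false

-- ===== PORT B =====
-- fullmatch of the regex 0[0-9]{1,7} ported by hand: leading '0', then 1..7 ASCII digits,
-- nothing else (exact: the pattern has no Unicode classes, [0-9] is the ASCII range test).
def remove_sdt_alt (text : String) : Bool :=
  let t := (PySem.Str.replace (PySem.Str.replace text "." "") "-" "").toList
  match t with
  | c :: rest => c == '0' && rest.all (fun c => '0' ≤ c && c ≤ '9') && 1 ≤ rest.length && rest.length ≤ 7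
  | [] => false

-- ===== PRECONDITION & SPEC =====
def Spec_remove_sdt (text : String) (out : Bool) : Prop := out = remove_sdt_alt text
instance (text : String) (out : Bool) : Decidable (Spec_remove_sdt text out) := by unfold Spec_remove_sdt; infer_instance

-- ===== CLAIM (what is proved, stated in full; the proofs are below) =====
def Claim_equal_remove_sdt : Prop := ∀ (text : String), Dom_remove_sdt text → Spec_remove_sdt text (remove_sdt text)

-- ===== LEMMAS AND PROOFS =====

-- ===== VERDICT (by name: the statement is the Claim_ definition above) =====
lemma digit_mem (ch : Char) :
    (ch ∈ ['0','1','2','3','4','5','6','7','8','9']) ↔ ('0' ≤ ch && ch ≤ '9') = true := by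
  have heq : ∀ d : Char, (ch = d) ↔ ch.val.toNat = d.val.toNat := by
    intro d
    exact ⟨fun h => by rw [h], fun h => Char.ext (UInt32.toNat.inj h)⟩
  simp only [List.mem_cons, List.not_mem_nil, or_false, Bool.and_eq_true, decide_eq_true_eq,
    Char.le_def, UInt32.le_iff_toNat_le, heq,
    show ('0').val.toNat = 48 by decide, show ('1').val.toNat = 49 by decide,
    show ('2').val.toNat = 50 by decide, show ('3').val.toNat = 51 by decide,
    show ('4').val.toNat = 52 by decide, show ('5').val.toNat = 53 by decide,
    show ('6').val.toNat = 54 by decide, show ('7').val.toNat = 55 by decide,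
    show ('8').val.toNat = 56 by decide, show ('9').val.toNat = 57 by decide]
  omega

lemma foldl_count (l : List Char) (n : Nat) :
    l.foldl (fun c x => if x ∈ ['0','1','2','3','4','5','6','7','8','9'] then c + 1 else c) n
      = n + l.countP (fun x => decide (x ∈ ['0','1','2','3','4','5','6','7','8','9'])) := by
  induction l generalizing n with
  | nil => simp
  | cons a l ih =>
    simp only [List.foldl_cons, List.countP_cons, ih, decide_eq_true_eq]
    split_ifs with h <;> omega

lemma if_eq_bool (P : Prop) [Decidable P] (b : Bool) (h : P ↔ b = true) :
    (if P then true else false) = b := by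
  split_ifs with hp
  · exact (h.mp hp).symm
  · cases hb : b
    · rfl
    · exact absurd (h.mpr hb) hp

lemma core (cs : List Char) :
    (if 2 ≤ ((PySem.List.pyRange 0 cs.length 1).foldl
        (fun c i => if (PySem.List.pyGetD cs i ' ') ∈ ['0','1','2','3','4','5','6','7','8','9'] then c + 1 else c) 0 : Nat) ∧
        ((PySem.List.pyRange 0 cs.length 1).foldl
        (fun c i => if (PySem.List.pyGetD cs i ' ') ∈ ['0','1','2','3','4','5','6','7','8','9'] then c + 1 else c) 0 : Nat) ≤ 8 ∧
        ((PySem.List.pyRange 0 cs.length 1).foldl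
        (fun c i => if (PySem.List.pyGetD cs i ' ') ∈ ['0','1','2','3','4','5','6','7','8','9'] then c + 1 else c) 0 : Nat) = cs.length ∧
        PySem.List.pyGet? cs 0 = some '0' then true else false) =
    (match cs with
     | c :: rest => c == '0' && rest.all (fun c => '0' ≤ c && c ≤ '9') && 1 ≤ rest.length && rest.length ≤ 7
     | [] => false) := by
  rw [PySem.List.foldl_pyRange_zero_pyGetD' cs ' '
        (fun c x => if x ∈ ['0','1','2','3','4','5','6','7','8','9'] then c + 1 else c) 0,
      foldl_count]
  cases cs with
  | nil => simp [PySem.List.pyGet?]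
  | cons c rest =>
    have hget : PySem.List.pyGet? (c :: rest) 0 = some c := by
      simp [PySem.List.pyGet?, PySem.List.pyIdx?]
    apply if_eq_bool
    rw [hget]
    have hle : rest.countP (fun x => decide (x ∈ ['0','1','2','3','4','5','6','7','8','9'])) ≤ rest.length :=
      List.countP_le_length
    have hall : rest.countP (fun x => decide (x ∈ ['0','1','2','3','4','5','6','7','8','9'])) = rest.length ↔
        (rest.all (fun c => '0' ≤ c && c ≤ '9')) = true := by
      rw [List.countP_eq_length, List.all_eq_true]
      constructor
      · intro h x hx; exact (digit_mem x).mp (by simpa using h x hx)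
      · intro h x hx; simpa using (digit_mem x).mpr (h x hx)
    simp only [List.countP_cons, Bool.and_eq_true, beq_iff_eq, decide_eq_true_eq,
      Option.some_inj, List.length_cons]
    constructor
    · rintro ⟨h1, h2, h3, rfl⟩
      have hif : (if ('0':Char) ∈ ['0','1','2','3','4','5','6','7','8','9'] then (1:Nat) else 0) = 1 := by
        decide
      rw [hif] at h1 h2 h3
      exact ⟨⟨⟨rfl, hall.mp (by omega)⟩, by omega⟩, by omega⟩
    · rintro ⟨⟨⟨rfl, hall'⟩, h1⟩, h2⟩
      have hif : (if ('0':Char) ∈ ['0','1','2','3','4','5','6','7','8','9'] then (1:Nat) else 0) = 1 := by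
        decide
      rw [hif]
      have := hall.mpr hall'
      exact ⟨by omega, by omega, by omega, rfl⟩

theorem remove_sdt_spec : Claim_equal_remove_sdt := by
  intro text _
  show remove_sdt text = remove_sdt_alt text
  simp only [remove_sdt, remove_sdt_alt]
  exact core ((PySem.Str.replace (PySem.Str.replace text "." "") "-" "").toList)
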